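-- pv_equiv track=rewrite | github.com/CannonJunior/rag-agent-system | src/mcp_tools/query_tools.py | _create_content_preview
-- ===== SOURCE A (Python) =====
-- def _create_content_preview(content: str, query: str, max_length: int = 300) -> str:
--     """Create a content preview highlighting the query terms."""
--     # Find the best match position
--     query_lower = query.lower()
--     content_lower = content.lower()
--
--     # Find first occurrence of any query word
--     query_words = query_lower.split()
--     best_pos = len(content)
--
--     for word in query_words:
--         pos = content_lower.find(word)
--         if pos != -1 and pos < best_pos:
--             best_pos = pos
--
--     if best_pos == len(content):
--         # No match found, return beginning
--         best_pos = 0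
--
--     # Calculate preview window
--     start = max(0, best_pos - max_length // 2)
--     end = min(len(content), start + max_length)
--
--     # Adjust start if we're at the end
--     if end - start < max_length:
--         start = max(0, end - max_length)
--
--     preview = content[start:end]
--
--     # Add ellipsis if truncated
--     if start > 0:
--         preview = "..." + preview
--     if end < len(content):
--         preview = preview + "..."
--
--     return preview
-- ===== SOURCE B (Python) =====
-- def _create_content_preview(content: str, query: str, max_length: int = 300) -> str:
--     """Create a content preview around the first query-word match.
--     Single left-to-right scan for the match position, then a closed-form
--     window (end first, start clamped from it) instead of A's adjust-after step."""
--     content_lower = content.lower()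
--     query_words = query.lower().split()
--
--     # One pass: the first index where ANY query word starts is the minimum
--     # of the per-word first occurrences (0 if none matches / no words).
--     best_pos = 0
--     for i in range(len(content)):
--         if any(content_lower.startswith(w, i) for w in query_words):
--             best_pos = i
--             break
--
--     # Closed-form window: compute end once, derive start from it.
--     end = min(len(content), max(0, best_pos - max_length // 2) + max_length)
--     start = max(0, end - max_length)
--
--     head = "..." if start > 0 else ""
--     tail = "..." if end < len(content) else ""
--     return head + content[start:end] + tail
-- ===== Notes on version B (the rewrite author's own statement) =====
-- stated objective: alternative
-- what changed: A finds the match by a per-word content_lower.find(word) loop minimised against len(content) and then adjusts the window start after computing end; B makes one left-to-right scan of the content stopping at the first position where any query word starts, and computes the window in closed form (end first, start = max(0, end - max_length)) with the ellipses assembled in a single concatenation.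
import Mathlib
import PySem

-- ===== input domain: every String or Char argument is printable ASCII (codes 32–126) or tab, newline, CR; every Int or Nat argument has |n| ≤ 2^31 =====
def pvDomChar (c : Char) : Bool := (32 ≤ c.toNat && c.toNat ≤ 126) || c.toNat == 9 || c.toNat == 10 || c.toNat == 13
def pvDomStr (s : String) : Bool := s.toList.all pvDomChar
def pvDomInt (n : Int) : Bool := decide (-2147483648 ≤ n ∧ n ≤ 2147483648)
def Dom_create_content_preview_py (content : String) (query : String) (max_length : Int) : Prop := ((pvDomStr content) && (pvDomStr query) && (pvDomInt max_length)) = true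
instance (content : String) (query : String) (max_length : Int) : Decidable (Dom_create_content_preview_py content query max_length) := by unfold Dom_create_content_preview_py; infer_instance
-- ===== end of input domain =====

-- B replaces A's per-word find-and-minimise loop by ONE left-to-right scan stopping at the first
-- position where any query word starts, and replaces A's compute-then-adjust window by a closed
-- form (end first, start derived from end); objective: alternative (same cost, not claimed faster).

-- ===== PORT A =====
def create_content_preview_py (content : String) (query : String) (max_length : Int) : String :=
  let cs := content.toList
  let query_lower := PySem.Chars.lower query.toList
  let content_lower := PySem.Chars.lower cs
  let query_words := PySem.Chars.split₀ query_lower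
  let n : Int := PySem.List.len cs
  -- for word in query_words: pos = content_lower.find(word); if pos != -1 and pos < best_pos: …
  let best0 : Int := query_words.foldl (fun best_pos word =>
      let pos := PySem.Chars.find content_lower word
      if pos ≠ -1 ∧ pos < best_pos then pos else best_pos) n
  let best_pos : Int := if best0 = n then 0 else best0
  let start0 : Int := max 0 (best_pos - PySem.Int.floordiv max_length 2)
  let end_ : Int := min n (start0 + max_length)
  let start : Int := if end_ - start0 < max_length then max 0 (end_ - max_length) else start0
  let preview0 := PySem.List.slice cs (some start) (some end_)
  let preview1 := if 0 < start then "...".toList ++ preview0 else preview0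
  let preview2 := if end_ < n then preview1 ++ "...".toList else preview1
  String.ofList preview2

-- ===== PORT B =====
-- Source B's scan loop: `for i in range(len(content)): if any(content_lower.startswith(w, i) …): break`.
-- The loop index i together with the remaining suffix content_lower[i:] is the recursion state;
-- startswith(w, i) is exactly `w` being a prefix of that suffix (0 ≤ i ≤ len).
def pvScanB (words : List (List Char)) : List Char → Nat → Int
  | [], _ => 0
  | suffix@(_ :: rest), i =>
      if words.any (fun w => w.isPrefixOf suffix) then (i : Int)
      else pvScanB words rest (i + 1)

def create_content_preview_py_alt (content : String) (query : String) (max_length : Int) : String :=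
  let cs := content.toList
  let content_lower := PySem.Chars.lower cs
  let query_words := PySem.Chars.split₀ (PySem.Chars.lower query.toList)
  let best_pos : Int := pvScanB query_words content_lower 0
  let end_ : Int := min (PySem.List.len cs) (max 0 (best_pos - PySem.Int.floordiv max_length 2) + max_length)
  let start : Int := max 0 (end_ - max_length)
  let head := if 0 < start then "...".toList else []
  let tail := if end_ < PySem.List.len cs then "...".toList else []
  String.ofList (head ++ PySem.List.slice cs (some start) (some end_) ++ tail)

-- ===== PRECONDITION & SPEC =====
def Spec_create_content_preview_py (content : String) (query : String) (max_length : Int) (out : String) : Prop := out = create_content_preview_py_alt content query max_length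
instance (content : String) (query : String) (max_length : Int) (out : String) : Decidable (Spec_create_content_preview_py content query max_length out) := by unfold Spec_create_content_preview_py; infer_instance

-- ===== CLAIM (what is proved, stated in full; the proofs are below) =====
def Claim_equal_create_content_preview_py : Prop := ∀ (content : String) (query : String) (max_length : Int), Dom_create_content_preview_py content query max_length → Spec_create_content_preview_py content query max_length (create_content_preview_py content query max_length)

-- ===== LEMMAS AND PROOFS =====

lemma pvFold_le_init (L : List Char) (ws : List (List Char)) (b : Int) :
    ws.foldl (fun best_pos word =>
      let pos := PySem.Chars.find L word
      if pos ≠ -1 ∧ pos < best_pos then pos else best_pos) b ≤ b := by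
  induction ws generalizing b with
  | nil => simp
  | cons w ws ih =>
    simp only [List.foldl_cons]
    refine le_trans (ih _) ?_
    dsimp only
    split_ifs with h
    · exact le_of_lt h.2
    · exact le_refl b

lemma pvFold_le_find (L : List Char) (ws : List (List Char)) (b : Int) (w : List Char)
    (hw : w ∈ ws) (hp : PySem.Chars.find L w ≠ -1) :
    ws.foldl (fun best_pos word =>
      let pos := PySem.Chars.find L word
      if pos ≠ -1 ∧ pos < best_pos then pos else best_pos) b ≤ PySem.Chars.find L w := by
  induction ws generalizing b with
  | nil => cases hw
  | cons w' ws ih =>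
    simp only [List.foldl_cons]
    rcases List.mem_cons.mp hw with rfl | hw'
    · refine le_trans (pvFold_le_init L ws _) ?_
      dsimp only
      split_ifs with h
      · exact le_refl _
      · push Not at h
        exact h hp
    · exact ih _ hw'

lemma pvFold_val (L : List Char) (ws : List (List Char)) (b : Int) :
    ws.foldl (fun best_pos word =>
      let pos := PySem.Chars.find L word
      if pos ≠ -1 ∧ pos < best_pos then pos else best_pos) b = b ∨
    ∃ w ∈ ws, ws.foldl (fun best_pos word =>
      let pos := PySem.Chars.find L word
      if pos ≠ -1 ∧ pos < best_pos then pos else best_pos) b = PySem.Chars.find L w ∧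
      PySem.Chars.find L w ≠ -1 := by
  induction ws generalizing b with
  | nil => left; rfl
  | cons w ws ih =>
    simp only [List.foldl_cons]
    split_ifs with h
    · rcases ih (PySem.Chars.find L w) with h1 | ⟨w', hw', h1, h2⟩
      · exact Or.inr ⟨w, List.mem_cons_self, h1, h.1⟩
      · exact Or.inr ⟨w', List.mem_cons_of_mem _ hw', h1, h2⟩
    · rcases ih b with h1 | ⟨w', hw', h1, h2⟩
      · exact Or.inl h1
      · exact Or.inr ⟨w', List.mem_cons_of_mem _ hw', h1, h2⟩

lemma pvAny_iff (ws : List (List Char)) (s : List Char) :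
    ws.any (fun w => w.isPrefixOf s) = true ↔ ∃ w ∈ ws, w <+: s := by
  simp [List.any_eq_true, List.isPrefixOf_iff_prefix]

lemma pvScanB_none (ws : List (List Char)) (s : List Char) (k : Nat)
    (h : ∀ j, j < s.length → ¬ ∃ w ∈ ws, w <+: s.drop j) :
    pvScanB ws s k = 0 := by
  induction s generalizing k with
  | nil => rfl
  | cons c rest ih =>
    rw [pvScanB, if_neg]
    · exact ih (k + 1) (fun j hj => by simpa using h (j + 1) (by simpa using hj))
    · intro hc
      exact h 0 (by simp) (by simpa using (pvAny_iff ws (c :: rest)).mp hc)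

lemma pvScanB_found (ws : List (List Char)) (s : List Char) (k r : Nat)
    (hr : r < s.length) (hP : ∃ w ∈ ws, w <+: s.drop r)
    (hmin : ∀ j, j < r → ¬ ∃ w ∈ ws, w <+: s.drop j) :
    pvScanB ws s k = ((k + r : Nat) : Int) := by
  induction s generalizing k r with
  | nil => simp at hr
  | cons c rest ih =>
    match r with
    | 0 =>
      rw [pvScanB, if_pos]
      · simp
      · exact (pvAny_iff ws (c :: rest)).mpr (by simpa using hP)
    | r' + 1 =>
      rw [pvScanB, if_neg]
      · have := ih (k + 1) r' (by simpa using hr) (by simpa using hP)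
          (fun j hj => by simpa using hmin (j + 1) (by omega))
        rw [this]; push_cast; ring
      · intro hc
        exact hmin 0 (by omega) (by simpa using (pvAny_iff ws (c :: rest)).mp hc)

lemma pvBest_eq (L : List Char) (ws : List (List Char)) :
    (if (ws.foldl (fun best_pos word =>
        let pos := PySem.Chars.find L word
        if pos ≠ -1 ∧ pos < best_pos then pos else best_pos) (L.length : Int)) = (L.length : Int)
      then 0
      else ws.foldl (fun best_pos word =>
        let pos := PySem.Chars.find L word
        if pos ≠ -1 ∧ pos < best_pos then pos else best_pos) (L.length : Int)) =
    pvScanB ws L 0 := by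
  set n : Int := (L.length : Int) with hn
  set m := ws.foldl (fun best_pos word =>
        let pos := PySem.Chars.find L word
        if pos ≠ -1 ∧ pos < best_pos then pos else best_pos) n with hm
  have hinfix : ∀ j (w : List Char), w <+: L.drop j → PySem.Chars.find L w ≠ -1 := by
    intro j w hpre
    rw [PySem.Chars.find_ne_neg_one_iff]
    exact hpre.isInfix.trans (List.drop_suffix j L).isInfix
  by_cases hmn : m = n
  · rw [if_pos hmn]
    symm
    apply pvScanB_none
    rintro j hj ⟨w, hw, hpre⟩
    have hfind := hinfix j w hpre
    have h1 := pvFold_le_find L ws n w hw hfind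
    rw [← hm, hmn] at h1
    have h2 := PySem.Chars.find_le_length L w
    have hfn : PySem.Chars.find L w = n := le_antisymm h2 h1
    have h0 : 0 ≤ PySem.Chars.find L w := by
      have := PySem.Chars.neg_one_le_find L w
      omega
    have hsp := (PySem.Chars.find_spec h0).1
    rw [hfn] at hsp
    have : L.drop n.toNat = [] := by simp [hn]
    rw [this] at hsp
    have hwnil : w = [] := List.prefix_nil.mp hsp
    rw [hwnil, PySem.Chars.find_nil] at hfn
    omega
  · rw [if_neg hmn]
    rcases pvFold_val L ws n with h1 | ⟨w1, hw1, h1, hne1⟩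
    · rw [← hm] at h1; exact absurd h1 hmn
    rw [← hm] at h1
    have h0 : 0 ≤ m := by
      have := PySem.Chars.neg_one_le_find L w1
      omega
    have hlt : m < n := lt_of_le_of_ne (h1 ▸ PySem.Chars.find_le_length L w1) hmn
    have h0' : 0 ≤ PySem.Chars.find L w1 := h1 ▸ h0
    have hres := pvScanB_found ws L 0 m.toNat (by omega)
      ⟨w1, hw1, by
        have := (PySem.Chars.find_spec h0').1
        rwa [← h1] at this⟩
      (by
        rintro j hj ⟨w, hw, hpre⟩
        have hfind := hinfix j w hpre
        have hle := pvFold_le_find L ws n w hw hfind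
        rw [← hm] at hle
        have h0w : 0 ≤ PySem.Chars.find L w := by
          have := PySem.Chars.neg_one_le_find L w
          omega
        exact (PySem.Chars.find_spec h0w).2 j (by omega) hpre)
    rw [hres]
    simp [Int.toNat_of_nonneg h0]

lemma pvLength_lower (cs : List Char) : (PySem.Chars.lower cs).length = cs.length := by
  simp [PySem.Chars.lower]

lemma pvScanB_nonneg (ws : List (List Char)) (s : List Char) (k : Nat) :
    (0 : Int) ≤ pvScanB ws s k := by
  induction s generalizing k with
  | nil => simp [pvScanB]
  | cons c rest ih =>
    rw [pvScanB]
    split_ifs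
    · exact Int.natCast_nonneg k
    · exact ih (k + 1)

-- A's adjust-after window start equals B's closed-form start (best_pos ≥ 0 in both programs).
lemma pvStart_eq (n bp ml h : Int) (hbp : 0 ≤ bp) :
    (if min n (max 0 (bp - h) + ml) - max 0 (bp - h) < ml
      then max 0 (min n (max 0 (bp - h) + ml) - ml)
      else max 0 (bp - h)) =
    max 0 (min n (max 0 (bp - h) + ml) - ml) := by
  omega

-- ===== VERDICT (by name: the statement is the Claim_ definition above) =====
theorem create_content_preview_py_spec : Claim_equal_create_content_preview_py := by
  intro content query max_length _
  unfold Spec_create_content_preview_py create_content_preview_py create_content_preview_py_alt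
  have h := pvBest_eq (PySem.Chars.lower content.toList)
      (PySem.Chars.split₀ (PySem.Chars.lower query.toList))
  rw [pvLength_lower] at h
  simp only [PySem.List.len_eq]
  rw [h]
  set cs := content.toList
  set bp : Int := pvScanB (PySem.Chars.split₀ (PySem.Chars.lower query.toList))
      (PySem.Chars.lower cs) 0
  have hbp : 0 ≤ bp := pvScanB_nonneg _ _ 0
  rw [pvStart_eq (cs.length : Int) bp max_length (PySem.Int.floordiv max_length 2) hbp]
  split_ifs <;> simp
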